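-- pv_equiv track=rewrite | github.com/xor2003/angr-platforms | angr_platforms/X86_16/ir/condition_ir.py | _normalize_arg_fingerprint_8616
-- ===== SOURCE A (Python) =====
-- def _split_fingerprint_call_8616(value: str) -> tuple[str, str] | None:
--     """Split ``CmpEQ(reg:ax,#0x0)`` into (``CmpEQ``, ``reg:ax,#0x0``)."""
--     if not isinstance(value, str) or not value.endswith(")"):
--         return None
--     open_idx = value.find("(")
--     if open_idx <= 0:
--         return None
--     return value[:open_idx], value[open_idx + 1 : -1]
--
-- def _split_fingerprint_args_8616(args_str: str) -> list[str]:
--     """Split fingerprint arguments by top-level commas, respecting nested parens."""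
--     parts: list[str] = []
--     depth = 0
--     current: list[str] = []
--     for ch in args_str:
--         if ch == "(":
--             depth += 1
--             current.append(ch)
--         elif ch == ")":
--             depth -= 1
--             current.append(ch)
--         elif ch == "," and depth == 0:
--             parts.append("".join(current).strip())
--             current = []
--         else:
--             current.append(ch)
--     if current:
--         parts.append("".join(current).strip())
--     return parts
--
-- def _normalize_arg_fingerprint_8616(arg: str) -> str:
--     """Recursively normalize a fingerprint arg, handling nested calls."""
--     call = _split_fingerprint_call_8616(arg)
--     if call is None:
--         return arg
--     op, args_str = call
--     args = _split_fingerprint_args_8616(args_str)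
--     normalized_args = [_normalize_arg_fingerprint_8616(a) for a in args]
--     return f"{op}({','.join(normalized_args)})"
-- ===== SOURCE B (Python) =====
-- def _normalize_arg_fingerprint_8616(arg: str) -> str:
--     """Recursively normalize a fingerprint arg, handling nested calls."""
--     if not arg.endswith(")"):
--         return arg
--     k = arg.find("(")
--     if k <= 0:
--         return arg
--     body = arg[k + 1:-1]
--     out = ""
--     if body != "":
--         s = body
--         while True:
--             piece, rest = _split_first_arg_8616(s)
--             out += _normalize_arg_fingerprint_8616(piece.strip())
--             if rest is None or rest == "":
--                 break
--             out += ","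
--             s = rest
--     return arg[:k] + "(" + out + ")"
--
-- def _split_first_arg_8616(s: str):
--     """Return (text before the first top-level comma, text after it or None)."""
--     depth = 0
--     for i, ch in enumerate(s):
--         if ch == "(":
--             depth += 1
--         elif ch == ")":
--             depth -= 1
--         elif ch == "," and depth == 0:
--             return s[:i], s[i + 1:]
--     return s, None
-- ===== Notes on version B (the rewrite author's own statement) =====
-- stated objective: alternative
-- what changed: B replaces A's three-helper pipeline (split all top-level args into a list, map the recursive normalizer over it, join) with an incremental while-loop that peels off one top-level argument at a time and appends its normalization directly to the output string, never materializing the argument list.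
import Mathlib
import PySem

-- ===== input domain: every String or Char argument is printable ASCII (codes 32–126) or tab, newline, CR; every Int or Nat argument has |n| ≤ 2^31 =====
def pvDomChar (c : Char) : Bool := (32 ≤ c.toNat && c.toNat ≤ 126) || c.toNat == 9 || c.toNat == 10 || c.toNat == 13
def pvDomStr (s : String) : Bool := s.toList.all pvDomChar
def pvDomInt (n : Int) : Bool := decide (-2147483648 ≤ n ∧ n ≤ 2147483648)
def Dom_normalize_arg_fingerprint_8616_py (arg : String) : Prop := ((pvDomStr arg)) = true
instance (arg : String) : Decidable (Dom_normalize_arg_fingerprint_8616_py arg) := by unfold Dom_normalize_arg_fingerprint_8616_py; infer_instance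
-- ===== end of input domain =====

-- B replaces A's split-all/map/join pipeline by an incremental loop that peels off one
-- top-level argument at a time; same result, similar cost (objective: alternative).

-- ===== PORT A =====
-- (these four lemmas exist only because the ports' well-founded recursions cite them by name)
theorem pvStripLen (cs : List Char) : (PySem.Chars.strip cs).length ≤ cs.length := by
  simp only [PySem.Chars.strip, PySem.Chars.rstrip, PySem.Chars.lstrip, List.length_reverse]
  calc (List.dropWhile PySem.Chars.isspace (List.dropWhile PySem.Chars.isspace cs).reverse).length
      ≤ (List.dropWhile PySem.Chars.isspace cs).reverse.length := List.length_dropWhile_le _ _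
    _ ≤ cs.length := by simpa using List.length_dropWhile_le PySem.Chars.isspace cs

def pvSplitCallA (value : List Char) : Option (List Char × List Char) :=
  if PySem.Chars.endswith value [')'] = false then none
  else if PySem.Chars.find value ['('] ≤ 0 then none
  else some (PySem.List.slice value none (some (PySem.Chars.find value ['('])),
             PySem.List.slice value (some (PySem.Chars.find value ['('] + 1)) (some (-1)))

theorem pvSplitCallA_body_length {value op body : List Char}
    (h : pvSplitCallA value = some (op, body)) : body.length < value.length := by
  unfold pvSplitCallA at h
  split_ifs at h with h1 h2
  have hend : [')'] <:+ value := (PySem.Chars.endswith_iff _ _).mp (by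
    cases hb : PySem.Chars.endswith value [')'] with
    | false => exact absurd hb h1
    | true => rfl)
  have hlen : 1 ≤ value.length := by simpa using hend.length_le
  have hb : body = PySem.List.slice value (some (PySem.Chars.find value ['('] + 1)) (some (-1)) := by
    injection h with h'; injection h' with _ hb; exact hb.symm
  subst hb
  rw [PySem.List.length_slice, PySem.List.clampIdx_neg_one]
  omega

def pvSplitArgsAuxA : List Char → Int → List Char → List (List Char) → List (List Char)
  | [], _, current, parts =>
      if current = [] then parts else parts ++ [PySem.Chars.strip current]
  | c :: cs, depth, current, parts =>
      if c = '(' then pvSplitArgsAuxA cs (depth + 1) (current ++ [c]) parts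
      else if c = ')' then pvSplitArgsAuxA cs (depth - 1) (current ++ [c]) parts
      else if c = ',' ∧ depth = 0 then
        pvSplitArgsAuxA cs depth [] (parts ++ [PySem.Chars.strip current])
      else pvSplitArgsAuxA cs depth (current ++ [c]) parts

def pvSplitArgsA (s : List Char) : List (List Char) := pvSplitArgsAuxA s 0 [] []

theorem pvSplitArgsAuxA_mem_length :
    ∀ (cs : List Char) (d : Int) (cur : List Char) (parts : List (List Char)) (a : List Char),
      a ∈ pvSplitArgsAuxA cs d cur parts → a ∈ parts ∨ a.length ≤ cur.length + cs.length := by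
  intro cs
  induction cs with
  | nil =>
      intro d cur parts a ha
      simp only [pvSplitArgsAuxA] at ha
      split_ifs at ha with hc
      · exact Or.inl ha
      · rcases List.mem_append.mp ha with h | h
        · exact Or.inl h
        · right
          simp only [List.mem_singleton] at h
          subst h
          simpa using pvStripLen cur
  | cons c cs ih =>
      intro d cur parts a ha
      simp only [pvSplitArgsAuxA] at ha
      split_ifs at ha with h1 h2 h3
      · rcases ih _ _ _ _ ha with h | h
        · exact Or.inl h
        · right; simp at h ⊢; omega
      · rcases ih _ _ _ _ ha with h | h
        · exact Or.inl h
        · right; simp at h ⊢; omega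
      · rcases ih _ _ _ _ ha with h | h
        · rcases List.mem_append.mp h with h | h
          · exact Or.inl h
          · right
            simp only [List.mem_singleton] at h
            subst h
            have := pvStripLen cur
            simp; omega
        · right; simp at h ⊢; omega
      · rcases ih _ _ _ _ ha with h | h
        · exact Or.inl h
        · right; simp at h ⊢; omega

theorem pvSplitArgsA_mem_length {s a : List Char} (ha : a ∈ pvSplitArgsA s) :
    a.length ≤ s.length := by
  rcases pvSplitArgsAuxA_mem_length s 0 [] [] a ha with h | h
  · simp at h
  · simpa using h

def pvNormalizeA (arg : List Char) : List Char :=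
  match h : pvSplitCallA arg with
  | none => arg
  | some (op, argsStr) =>
      op ++ '(' ::
        (PySem.Chars.join [','] ((pvSplitArgsA argsStr).attach.map (fun a => pvNormalizeA a.1))
          ++ [')'])
termination_by arg.length
decreasing_by
  exact lt_of_le_of_lt (pvSplitArgsA_mem_length a.2) (pvSplitCallA_body_length h)

def normalize_arg_fingerprint_8616_py (arg : String) : String :=
  String.ofList (pvNormalizeA arg.toList)

-- ===== PORT B =====
def pvSplitFirstB : List Char → Int → (List Char × Option (List Char))
  | [], _ => ([], none)
  | c :: cs, depth =>
      if c = '(' then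
        let r := pvSplitFirstB cs (depth + 1); (c :: r.1, r.2)
      else if c = ')' then
        let r := pvSplitFirstB cs (depth - 1); (c :: r.1, r.2)
      else if c = ',' ∧ depth = 0 then ([], some cs)
      else
        let r := pvSplitFirstB cs depth; (c :: r.1, r.2)

theorem pvSplitFirstB_fst_length :
    ∀ (cs : List Char) (d : Int), (pvSplitFirstB cs d).1.length ≤ cs.length := by
  intro cs
  induction cs with
  | nil => intro d; simp [pvSplitFirstB]
  | cons c cs ih =>
      intro d
      simp only [pvSplitFirstB]
      split_ifs <;> simp <;> exact ih _

theorem pvSplitFirstB_snd_length :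
    ∀ (cs : List Char) (d : Int) (r : List Char),
      (pvSplitFirstB cs d).2 = some r → r.length < cs.length := by
  intro cs
  induction cs with
  | nil => intro d r h; simp [pvSplitFirstB] at h
  | cons c cs ih =>
      intro d r h
      simp only [pvSplitFirstB] at h
      split_ifs at h with h1 h2 h3
      · have := ih _ _ h; simp; omega
      · have := ih _ _ h; simp; omega
      · simp at h; subst h; simp
      · have := ih _ _ h; simp; omega

mutual
def pvNormalizeB (arg : List Char) : List Char :=
  if PySem.Chars.endswith arg [')'] = false then arg
  else if PySem.Chars.find arg ['('] ≤ 0 then arg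
  else
    PySem.List.slice arg none (some (PySem.Chars.find arg ['('])) ++
      '(' :: ((if PySem.List.slice arg (some (PySem.Chars.find arg ['('] + 1)) (some (-1)) = []
               then []
               else pvNormArgsB
                 (PySem.List.slice arg (some (PySem.Chars.find arg ['('] + 1)) (some (-1))) [])
              ++ [')'])
termination_by (arg.length, 1)
decreasing_by
  rename_i h1 h2 _
  have hend : [')'] <:+ arg := (PySem.Chars.endswith_iff _ _).mp (by
    cases hb : PySem.Chars.endswith arg [')'] with
    | false => exact absurd hb h1
    | true => rfl)
  have hlen : 1 ≤ arg.length := by simpa using hend.length_le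
  have hbl : (PySem.List.slice arg (some (PySem.Chars.find arg ['('] + 1)) (some (-1))).length
      < arg.length := by
    rw [PySem.List.length_slice, PySem.List.clampIdx_neg_one]
    omega
  first
  | omega
  | (simp only [Prod.mk_lt_mk]; omega)
  | (apply Prod.Lex.left; omega)

def pvNormArgsB (s : List Char) (out : List Char) : List Char :=
  match hr : (pvSplitFirstB s 0).2 with
  | none => out ++ pvNormalizeB (PySem.Chars.strip (pvSplitFirstB s 0).1)
  | some [] => out ++ pvNormalizeB (PySem.Chars.strip (pvSplitFirstB s 0).1)
  | some (c :: r) =>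
      pvNormArgsB (c :: r)
        ((out ++ pvNormalizeB (PySem.Chars.strip (pvSplitFirstB s 0).1)) ++ [','])
termination_by (s.length, 2)
decreasing_by
  all_goals
    first
    | (have h1 := pvStripLen (pvSplitFirstB s 0).1
       have h2 := pvSplitFirstB_fst_length s 0
       first
       | omega
       | (simp only [Prod.mk_lt_mk]; omega)
       | (apply Prod.Lex.left; omega)
       | (have h3 := pvSplitFirstB_snd_length s 0 _ hr
          first
          | omega
          | (simp only [Prod.mk_lt_mk]; omega)
          | (apply Prod.Lex.left; omega)))
end

def normalize_arg_fingerprint_8616_py_alt (arg : String) : String :=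
  String.ofList (pvNormalizeB arg.toList)

-- ===== PRECONDITION & SPEC =====
def Spec_normalize_arg_fingerprint_8616_py (arg : String) (out : String) : Prop := out = normalize_arg_fingerprint_8616_py_alt arg
instance (arg : String) (out : String) : Decidable (Spec_normalize_arg_fingerprint_8616_py arg out) := by unfold Spec_normalize_arg_fingerprint_8616_py; infer_instance

-- ===== CLAIM (what is proved, stated in full; the proofs are below) =====
def Claim_equal_normalize_arg_fingerprint_8616_py : Prop := ∀ (arg : String), Dom_normalize_arg_fingerprint_8616_py arg → Spec_normalize_arg_fingerprint_8616_py arg (normalize_arg_fingerprint_8616_py arg)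

-- ===== LEMMAS AND PROOFS =====

theorem pvSplitFirstB_none :
    ∀ (cs : List Char) (d : Int), (pvSplitFirstB cs d).2 = none → (pvSplitFirstB cs d).1 = cs := by
  intro cs
  induction cs with
  | nil => intro d _; simp [pvSplitFirstB]
  | cons c cs ih =>
      intro d h
      simp only [pvSplitFirstB] at h ⊢
      split_ifs at h ⊢ <;> simp_all

theorem pvSplitArgsAuxA_acc :
    ∀ (cs : List Char) (d : Int) (cur : List Char) (parts : List (List Char)),
      pvSplitArgsAuxA cs d cur parts = parts ++ pvSplitArgsAuxA cs d cur [] := by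
  intro cs
  induction cs with
  | nil => intro d cur parts; simp only [pvSplitArgsAuxA]; split_ifs <;> simp
  | cons c cs ih =>
      intro d cur parts
      simp only [pvSplitArgsAuxA]
      split_ifs
      · exact ih _ _ _
      · exact ih _ _ _
      · rw [ih _ _ (parts ++ [PySem.Chars.strip cur]), ih _ _ ([] ++ [PySem.Chars.strip cur])]
        simp
      · exact ih _ _ _

theorem pvSplitArgsAuxA_ne_nil :
    ∀ (cs : List Char) (d : Int) (cur : List Char) (parts : List (List Char)),
      pvSplitArgsAuxA cs d cur parts = [] → cs = [] ∧ cur = [] ∧ parts = [] := by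
  intro cs
  induction cs with
  | nil =>
      intro d cur parts h
      simp only [pvSplitArgsAuxA] at h
      split_ifs at h with hc
      · exact ⟨rfl, hc, h⟩
      · simp at h
  | cons c cs ih =>
      intro d cur parts h
      simp only [pvSplitArgsAuxA] at h
      split_ifs at h
      · exact absurd (ih _ _ _ h).2.1 (by simp)
      · exact absurd (ih _ _ _ h).2.1 (by simp)
      · exact absurd (ih _ _ _ h).2.2 (by simp)
      · exact absurd (ih _ _ _ h).2.1 (by simp)

theorem pvSplitArgsA_ne_nil {cs : List Char} (h : cs ≠ []) : pvSplitArgsA cs ≠ [] := by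
  intro hc
  exact h (pvSplitArgsAuxA_ne_nil cs 0 [] [] hc).1

-- A's depth-carrying splitter, characterised by B's first-argument scanner.
theorem pvSplitArgsAuxA_eq_splitFirst :
    ∀ (cs : List Char) (d : Int) (cur : List Char),
      pvSplitArgsAuxA cs d cur [] =
        match (pvSplitFirstB cs d) with
        | (p, none) => if cur ++ p = [] then [] else [PySem.Chars.strip (cur ++ p)]
        | (p, some r) => PySem.Chars.strip (cur ++ p) :: pvSplitArgsA r := by
  intro cs
  induction cs with
  | nil => intro d cur; simp [pvSplitArgsAuxA, pvSplitFirstB]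
  | cons c cs ih =>
      intro d cur
      simp only [pvSplitArgsAuxA, pvSplitFirstB]
      split_ifs with h1 h2 h3
      · rw [ih (d + 1) (cur ++ [c])]
        rcases hp : pvSplitFirstB cs (d + 1) with ⟨p, r⟩
        cases r <;> simp
      · rw [ih (d - 1) (cur ++ [c])]
        rcases hp : pvSplitFirstB cs (d - 1) with ⟨p, r⟩
        cases r <;> simp
      · obtain ⟨hc, hd⟩ := h3
        subst hd
        rw [pvSplitArgsAuxA_acc]
        simp [pvSplitArgsA]
      · rw [ih d (cur ++ [c])]
        rcases hp : pvSplitFirstB cs d with ⟨p, r⟩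
        cases r <;> simp

theorem pvSplitArgsA_eq_none {s : List Char} (h : (pvSplitFirstB s 0).2 = none) :
    pvSplitArgsA s =
      if (pvSplitFirstB s 0).1 = [] then [] else [PySem.Chars.strip (pvSplitFirstB s 0).1] := by
  have hmain := pvSplitArgsAuxA_eq_splitFirst s 0 []
  rcases hp : pvSplitFirstB s 0 with ⟨p, r⟩
  rw [hp] at hmain h
  cases r with
  | none => simpa [pvSplitArgsA] using hmain
  | some r => simp at h

theorem pvSplitArgsA_eq_some {s r : List Char} (h : (pvSplitFirstB s 0).2 = some r) :
    pvSplitArgsA s = PySem.Chars.strip (pvSplitFirstB s 0).1 :: pvSplitArgsA r := by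
  have hmain := pvSplitArgsAuxA_eq_splitFirst s 0 []
  rcases hp : pvSplitFirstB s 0 with ⟨p, r'⟩
  rw [hp] at hmain h
  cases r' with
  | none => simp at h
  | some r' =>
      simp only [Option.some.injEq] at h
      subst h
      simpa [pvSplitArgsA] using hmain

theorem pvNormArgsB_eq :
    ∀ (n : Nat) (s out : List Char), s.length ≤ n → s ≠ [] →
      pvNormArgsB s out =
        out ++ PySem.Chars.join [','] ((pvSplitArgsA s).map pvNormalizeB) := by
  intro n
  induction n with
  | zero => intro s out hn hs; cases s <;> simp_all
  | succ n ih =>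
      intro s out hn hs
      rw [pvNormArgsB.eq_def]
      split
      · rename_i hr
        have hps : (pvSplitFirstB s 0).1 = s := pvSplitFirstB_none s 0 hr
        rw [pvSplitArgsA_eq_none hr, hps, if_neg hs]
        simp [PySem.Chars.join_singleton]
      · rename_i hr
        rw [pvSplitArgsA_eq_some hr]
        simp [pvSplitArgsA, pvSplitArgsAuxA, PySem.Chars.join_singleton]
      · rename_i c rtl hr
        have hlt : (c :: rtl).length < s.length := pvSplitFirstB_snd_length s 0 _ hr
        rw [ih (c :: rtl) _ (by omega) (by simp)]
        rw [pvSplitArgsA_eq_some hr]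
        obtain ⟨q, qs, hq⟩ : ∃ q qs, pvSplitArgsA (c :: rtl) = q :: qs := by
          rcases hqq : pvSplitArgsA (c :: rtl) with _ | ⟨q, qs⟩
          · exact absurd hqq (pvSplitArgsA_ne_nil (by simp))
          · exact ⟨q, qs, rfl⟩
        rw [hq]
        simp only [List.map_cons]
        rw [PySem.Chars.join_cons_cons]
        simp

theorem pvNormalize_eq :
    ∀ (n : Nat) (arg : List Char), arg.length ≤ n → pvNormalizeA arg = pvNormalizeB arg := by
  intro n
  induction n with
  | zero =>
      intro arg hn
      have h0 : arg = [] := by cases arg <;> simp_all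
      subst h0
      rw [pvNormalizeA.eq_def, pvNormalizeB.eq_def]
      decide
  | succ n ih =>
      intro arg hn
      rw [pvNormalizeA.eq_def, pvNormalizeB.eq_def]
      split
      · rename_i hc
        unfold pvSplitCallA at hc
        split_ifs at hc with h1 h2
        · rw [if_pos h1]
        · rw [if_neg h1, if_pos h2]
      · rename_i op body hc
        have hbody : body.length < arg.length := pvSplitCallA_body_length hc
        have hguards : PySem.Chars.endswith arg [')'] ≠ false ∧
            ¬ PySem.Chars.find arg ['('] ≤ 0 ∧
            op = PySem.List.slice arg none (some (PySem.Chars.find arg ['('])) ∧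
            body = PySem.List.slice arg (some (PySem.Chars.find arg ['('] + 1)) (some (-1)) := by
          unfold pvSplitCallA at hc
          split_ifs at hc with h1 h2
          simp only [Option.some.injEq, Prod.mk.injEq] at hc
          exact ⟨h1, h2, hc.1.symm, hc.2.symm⟩
        obtain ⟨h1, h2, hop, hb⟩ := hguards
        rw [if_neg h1, if_neg h2, ← hop, ← hb]
        have hmap : (pvSplitArgsA body).attach.map (fun a => pvNormalizeA a.1)
            = (pvSplitArgsA body).map pvNormalizeB := by
          calc (pvSplitArgsA body).attach.map (fun a => pvNormalizeA a.1)
              = (pvSplitArgsA body).attach.map (fun a => pvNormalizeB a.1) :=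
                List.map_congr_left (fun a _ =>
                  ih a.1 (by have := pvSplitArgsA_mem_length a.2; omega))
            _ = (pvSplitArgsA body).map pvNormalizeB := List.attach_map_val
        rw [hmap]
        by_cases hbe : body = []
        · rw [if_pos hbe, hbe]
          simp [pvSplitArgsA, pvSplitArgsAuxA, PySem.Chars.join, List.intercalate]
        · rw [if_neg hbe, pvNormArgsB_eq body.length body [] (le_refl _) hbe]
          simp

-- ===== VERDICT (by name: the statement is the Claim_ definition above) =====
theorem normalize_arg_fingerprint_8616_py_spec : Claim_equal_normalize_arg_fingerprint_8616_py := by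
  intro arg _
  unfold Spec_normalize_arg_fingerprint_8616_py normalize_arg_fingerprint_8616_py normalize_arg_fingerprint_8616_py_alt
  rw [pvNormalize_eq arg.toList.length arg.toList (le_refl _)]
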